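-- pv_equiv track=rewrite | github.com/PonnagantiHemanth/testing_tool | py-test-box/PYTESTBOX/TESTS/TESTSUITES/pytestbox/device/hidpp20/mouse/feature_2121.py | gen_wheel_mode_sets
-- ===== SOURCE A (Python) =====
-- def gen_wheel_mode_sets(version):
--     wheel_mode_sets = []
--     if version == 0:
--         for i in range(8):
--             tmp = tuple(map(int, list('{0:b}'.format(i).zfill(3))))
--             wheel_mode_sets.append(tmp)
--         wheel_mode_sets.append((0, 0, 0))
--     elif version == 1:
--         for i in range(16):
--             tmp = tuple(map(int, list('{0:b}'.format(i).zfill(4))))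
--             wheel_mode_sets.append(tmp)
--         wheel_mode_sets.append((0, 0, 0, 0))
--     return wheel_mode_sets
-- ===== SOURCE B (Python) =====
-- def gen_wheel_mode_sets(version):
--     if version == 0:
--         n = 3
--     elif version == 1:
--         n = 4
--     else:
--         return []
--     combos = [()]
--     for _ in range(n):
--         combos = [t + (b,) for t in combos for b in (0, 1)]
--     return combos + [(0,) * n]
-- ===== Notes on version B (the rewrite author's own statement) =====
-- stated objective: simpler
-- what changed: Replaces per-integer binary string formatting ('{0:b}'.format(i).zfill(n) then mapping int over chars) with a cartesian-product fold that doubles a tuple list once per bit position, then appends the all-zeros tuple; no string processing at all.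
import Mathlib
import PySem

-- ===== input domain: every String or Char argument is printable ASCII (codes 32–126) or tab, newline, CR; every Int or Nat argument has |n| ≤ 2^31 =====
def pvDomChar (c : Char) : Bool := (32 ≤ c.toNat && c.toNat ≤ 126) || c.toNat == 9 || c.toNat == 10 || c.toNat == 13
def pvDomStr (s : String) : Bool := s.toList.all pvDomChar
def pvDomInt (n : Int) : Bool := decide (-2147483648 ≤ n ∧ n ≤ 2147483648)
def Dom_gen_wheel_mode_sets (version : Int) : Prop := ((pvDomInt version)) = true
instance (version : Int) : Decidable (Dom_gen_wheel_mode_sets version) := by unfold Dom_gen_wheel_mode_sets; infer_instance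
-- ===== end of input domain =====

-- B replaces per-integer binary string formatting with a cartesian-product fold over bit
-- positions (simpler: no string processing).

-- ===== PORT A =====
-- '{0:b}'.format(i) for i > 0: most-significant-first binary digits (no leading zeros)
-- fuel-guarded structural recursion (fuel = n suffices since n/2 strictly decreases)
def pvBinRecAux : Nat → Nat → List Char
  | 0, _ => []
  | fuel + 1, n =>
    if n = 0 then [] else pvBinRecAux fuel (n / 2) ++ [if n % 2 = 1 then '1' else '0']

def pvBinRec (n : Nat) : List Char := pvBinRecAux n n

-- '{0:b}'.format(i)
def pvBinFmt (n : Nat) : List Char := if n = 0 then ['0'] else pvBinRec n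

-- str.zfill(w): pad with '0' on the left up to width w
def pvZfill (s : List Char) (w : Nat) : List Char := List.replicate (w - s.length) '0' ++ s

-- int(c) for a digit character
def pvDigitInt (c : Char) : Int := (c.toNat : Int) - 48

def gen_wheel_mode_sets (version : Int) : List (List Int) :=
  if version = 0 then
    ((PySem.List.pyRange 0 8 1).foldl
      (fun acc i => acc ++ [(pvZfill (pvBinFmt i.toNat) 3).map pvDigitInt]) [])
      ++ [[0, 0, 0]]
  else if version = 1 then
    ((PySem.List.pyRange 0 16 1).foldl
      (fun acc i => acc ++ [(pvZfill (pvBinFmt i.toNat) 4).map pvDigitInt]) [])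
      ++ [[0, 0, 0, 0]]
  else []

-- ===== PORT B =====
-- cartesian-product fold: double the tuple list once per bit position
def pvProdBits (n : Nat) : List (List Int) :=
  (List.range n).foldl (fun acc _ => acc.flatMap (fun t => [t ++ [0], t ++ [1]])) [[]]

def gen_wheel_mode_sets_alt (version : Int) : List (List Int) :=
  if version = 0 then pvProdBits 3 ++ [List.replicate 3 0]
  else if version = 1 then pvProdBits 4 ++ [List.replicate 4 0]
  else []

-- ===== PRECONDITION & SPEC =====
def Spec_gen_wheel_mode_sets (version : Int) (out : List (List Int)) : Prop := out = gen_wheel_mode_sets_alt version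
instance (version : Int) (out : List (List Int)) : Decidable (Spec_gen_wheel_mode_sets version out) := by unfold Spec_gen_wheel_mode_sets; infer_instance

-- ===== CLAIM (what is proved, stated in full; the proofs are below) =====
def Claim_equal_gen_wheel_mode_sets : Prop := ∀ (version : Int), Dom_gen_wheel_mode_sets version → Spec_gen_wheel_mode_sets version (gen_wheel_mode_sets version)

-- ===== LEMMAS AND PROOFS =====

-- ===== VERDICT (by name: the statement is the Claim_ definition above) =====
theorem gen_wheel_mode_sets_spec : Claim_equal_gen_wheel_mode_sets := by
  intro version _
  unfold Spec_gen_wheel_mode_sets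
  by_cases h0 : version = 0
  · subst h0; decide
  · by_cases h1 : version = 1
    · subst h1; decide
    · simp [gen_wheel_mode_sets, gen_wheel_mode_sets_alt, h0, h1]
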